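-- pv_equiv track=rewrite | github.com/deblina23/HasCode | PizzaPractice/JudgeSystem.py | calculateLessItem
-- ===== SOURCE A (Python) =====
-- def calculateLessItem(pizzaTotal, groupList, memberList):
--     resultList = [0]* 4
--     TeamCount = 0
--     for memberPos in range(len(memberList)):
--         if (pizzaTotal > 0):
--             pizzaTotal = pizzaTotal - memberList[memberPos]
--             resultList[memberList[memberPos]- 1] = resultList[memberList[memberPos]- 1] + 1
--             TeamCount = TeamCount + 1
--             groupList[memberPos] = groupList[memberPos] - 1
--
--     return (TeamCount, pizzaTotal, groupList, resultList)
-- ===== SOURCE B (Python) =====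
-- def calculateLessItem(pizzaTotal, groupList, memberList):
--     # exclusive prefix sums of memberList
--     prefix = [0]
--     for m in memberList:
--         prefix.append(prefix[-1] + m)
--     # k = number of leading members processed: first index where the remaining total is exhausted
--     k = next((i for i in range(len(memberList)) if pizzaTotal - prefix[i] <= 0), len(memberList))
--     head = memberList[:k]
--     resultList = [head.count(v) for v in (1, 2, 3, 4)]
--     groupList[:k] = [g - 1 for g in groupList[:k]]
--     return (k, pizzaTotal - prefix[k], groupList, resultList)
-- ===== Notes on version B (the rewrite author's own statement) =====
-- stated objective: alternative
-- what changed: B replaces A's stateful per-member simulation (mutating pizzaTotal, resultList, TeamCount and groupList one iteration at a time) by computing exclusive prefix sums, scanning them for the first crossing index k, and then building the result combinatorially: resultList by counting the values 1..4 in memberList[:k], groupList by one slice assignment, and the remaining total as pizzaTotal - prefix[k].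
-- outside the precondition, e.g. on calculateLessItem(1, [5], [0]): A returns (1, 1, [4], [0, 0, 0, 1]), B returns (1, 1, [4], [0, 0, 0, 0])
import Mathlib
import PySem

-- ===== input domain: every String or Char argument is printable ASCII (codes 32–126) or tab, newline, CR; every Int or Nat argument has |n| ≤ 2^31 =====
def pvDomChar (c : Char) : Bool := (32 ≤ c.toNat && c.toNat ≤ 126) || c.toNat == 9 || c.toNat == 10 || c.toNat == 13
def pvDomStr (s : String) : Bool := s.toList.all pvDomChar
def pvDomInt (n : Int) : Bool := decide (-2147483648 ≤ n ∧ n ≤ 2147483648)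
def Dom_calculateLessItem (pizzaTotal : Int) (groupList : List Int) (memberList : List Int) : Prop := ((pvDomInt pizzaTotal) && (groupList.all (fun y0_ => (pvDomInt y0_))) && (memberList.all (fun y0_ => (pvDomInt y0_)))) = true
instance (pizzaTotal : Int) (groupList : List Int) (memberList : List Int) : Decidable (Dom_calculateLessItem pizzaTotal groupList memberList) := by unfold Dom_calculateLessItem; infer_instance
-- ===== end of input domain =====

-- B replaces A's stateful per-member simulation by prefix sums + a scan for the crossing index k,
-- then builds the result by counting values in the processed prefix (objective: alternative decomposition).
-- Both A and B mutate groupList in place in Python; the equivalence proved here is about the return value.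

-- ===== PORT A =====
-- the 'for memberPos in range(len(memberList))' loop, recursing over the remaining suffix while
-- carrying the current position; state = (pizzaTotal, resultList, TeamCount, groupList) as in A
def aLoop : List Int → Nat → Int → List Int → Int → List Int → Int × Int × List Int × List Int
  | [], _, pz, res, tc, gl => (tc, pz, gl, res)
  | m :: rest, pos, pz, res, tc, gl =>
    if pz > 0 then
      aLoop rest (pos + 1) (pz - m)
        (PySem.List.pySetD res (m - 1) (PySem.List.pyGetD res (m - 1) 0 + 1))
        (tc + 1)
        (PySem.List.pySetD gl ((pos : Nat) : Int) (PySem.List.pyGetD gl ((pos : Nat) : Int) 0 - 1))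
    else aLoop rest (pos + 1) pz res tc gl

def calculateLessItem (pizzaTotal : Int) (groupList : List Int) (memberList : List Int) : Int × Int × List Int × List Int :=
  aLoop memberList 0 pizzaTotal [0, 0, 0, 0] 0 groupList

-- ===== PORT B =====
-- prefix = [0]; for m in memberList: prefix.append(prefix[-1] + m)
def bPrefix (memberList : List Int) : List Int :=
  memberList.foldl (fun p m => p ++ [PySem.List.pyGetD p (-1) 0 + m]) [0]

def calculateLessItem_alt (pizzaTotal : Int) (groupList : List Int) (memberList : List Int) : Int × Int × List Int × List Int :=
  let pref := bPrefix memberList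
  -- k = next((i for i in range(len(memberList)) if pizzaTotal - prefix[i] <= 0), len(memberList))
  let k : Int := ((PySem.List.pyRange 0 (memberList.length : Int) 1).find?
      (fun i => decide (pizzaTotal - PySem.List.pyGetD pref i 0 ≤ 0))).getD (memberList.length : Int)
  let head := PySem.List.slice memberList none (some k)
  let resultList := [(1 : Int), 2, 3, 4].map (fun v => (PySem.List.count head v : Int))
  -- groupList[:k] = [g - 1 for g in groupList[:k]]
  let groupList' := (PySem.List.slice groupList none (some k)).map (fun g => g - 1)
      ++ PySem.List.slice groupList (some k) none
  (k, pizzaTotal - PySem.List.pyGetD pref k 0, groupList', resultList)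

-- ===== PRECONDITION & SPEC =====
-- Pre_ restricts to the natural domain: at every position the loop actually processes (the remaining
-- total is still positive) the member value is a group size 1..4 and groupList has a slot; outside it
-- A raises IndexError, or (for processed values 0..-3) returns a value produced by Python's
-- negative-index wraparound into resultList, an artefact of A's implementation no caller would want.
def Pre_calculateLessItem (pizzaTotal : Int) (groupList : List Int) (memberList : List Int) : Prop :=
  ∀ i : Nat, i < memberList.length → pizzaTotal - ((memberList.take i).sum) > 0 →
    1 ≤ memberList.getD i 0 ∧ memberList.getD i 0 ≤ 4 ∧ i < groupList.length
instance (pizzaTotal : Int) (groupList : List Int) (memberList : List Int) : Decidable (Pre_calculateLessItem pizzaTotal groupList memberList) := by unfold Pre_calculateLessItem; infer_instance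

def pvWitness_calculateLessItem : Int × List Int × List Int := (3, [5, 2], [1, 2])

def Spec_calculateLessItem (pizzaTotal : Int) (groupList : List Int) (memberList : List Int) (out : Int × Int × List Int × List Int) : Prop := out = calculateLessItem_alt pizzaTotal groupList memberList
instance (pizzaTotal : Int) (groupList : List Int) (memberList : List Int) (out : Int × Int × List Int × List Int) : Decidable (Spec_calculateLessItem pizzaTotal groupList memberList out) := by unfold Spec_calculateLessItem; infer_instance

-- ===== CLAIM (what is proved, stated in full; the proofs are below) =====
def Claim_equal_calculateLessItem : Prop := ∀ (pizzaTotal : Int) (groupList : List Int) (memberList : List Int), Dom_calculateLessItem pizzaTotal groupList memberList → Pre_calculateLessItem pizzaTotal groupList memberList → Spec_calculateLessItem pizzaTotal groupList memberList (calculateLessItem pizzaTotal groupList memberList)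

-- ===== LEMMAS AND PROOFS =====

-- number of leading members the loop processes: first i with pizzaTotal - prefixsum(i) ≤ 0
def cross (pz : Int) : List Int → Nat
  | [] => 0
  | m :: rest => if pz > 0 then cross (pz - m) rest + 1 else 0

theorem cross_le (pz : Int) (ml : List Int) : cross pz ml ≤ ml.length := by
  induction ml generalizing pz with
  | nil => simp [cross]
  | cons m rest ih =>
    simp only [cross, List.length_cons]
    split_ifs
    · exact Nat.succ_le_succ (ih _)
    · omega

theorem cross_of_nonpos (pz : Int) (ml : List Int) (h : ¬ pz > 0) : cross pz ml = 0 := by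
  cases ml <;> simp [cross, h]

theorem set_append_len {α : Type} (glA : List α) (g : α) (glB : List α) (v : α) :
    (glA ++ g :: glB).set glA.length v = glA ++ v :: glB := by
  induction glA with
  | nil => rfl
  | cons x xs ih => simp [ih]

theorem getD_append_len (glA : List Int) (g : Int) (glB : List Int) (d : Int) :
    (glA ++ g :: glB).getD glA.length d = g := by
  induction glA with
  | nil => rfl
  | cons x xs ih => simp only [List.cons_append]; simp only [List.getD] at *; simpa using ih

-- closed form for A's loop
theorem aLoop_closed (ml : List Int) : ∀ (pz a b c d tc : Int) (glA glB : List Int),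
    (∀ i : Nat, i < ml.length → pz - ((ml.take i).sum) > 0 →
      1 ≤ ml.getD i 0 ∧ ml.getD i 0 ≤ 4 ∧ i < glB.length) →
    aLoop ml glA.length pz [a, b, c, d] tc (glA ++ glB) =
      (tc + (cross pz ml : Int), pz - ((ml.take (cross pz ml)).sum),
       glA ++ ((glB.take (cross pz ml)).map (fun g => g - 1) ++ glB.drop (cross pz ml)),
       [a + ((ml.take (cross pz ml)).count 1 : Int),
        b + ((ml.take (cross pz ml)).count 2 : Int),
        c + ((ml.take (cross pz ml)).count 3 : Int),
        d + ((ml.take (cross pz ml)).count 4 : Int)]) := by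
  induction ml with
  | nil => intro pz a b c d tc glA glB _; simp [aLoop, cross]
  | cons m rest ih =>
    intro pz a b c d tc glA glB hpre
    by_cases hpz : pz > 0
    · have h0 := hpre 0 (by simp) (by simpa using hpz)
      simp only [List.getD, List.getElem?_cons_zero, Option.getD_some] at h0
      obtain ⟨hm1, hm4, hgl⟩ := h0
      obtain ⟨g, glB', rfl⟩ : ∃ g glB', glB = g :: glB' := by
        cases glB with
        | nil => simp at hgl
        | cons g t => exact ⟨g, t, rfl⟩
      have hga : (glA ++ g :: glB').getD glA.length 0 = g := getD_append_len glA g glB' 0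
      have hsa : (glA ++ g :: glB').set glA.length (g - 1) = glA ++ (g - 1) :: glB' :=
        set_append_len glA g glB' (g - 1)
      have hpre' : ∀ i : Nat, i < rest.length → (pz - m) - ((rest.take i).sum) > 0 →
          1 ≤ rest.getD i 0 ∧ rest.getD i 0 ≤ 4 ∧ i < glB'.length := by
        intro i hi hs
        have := hpre (i + 1) (by simpa using hi) (by simp [List.take_succ_cons]; omega)
        simpa [List.getD] using this
      have hrec := ih (pz - m) a b c d tc (glA ++ [g - 1]) glB'
      simp only [List.length_append, List.length_cons, List.length_nil] at hrec
      have hcross : cross pz (m :: rest) = cross (pz - m) rest + 1 := by simp [cross, hpz]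
      -- interval_cases on m to evaluate the resultList update
      interval_cases m <;>
      · simp only [aLoop, if_pos hpz, PySem.List.pySetD_natCast, PySem.List.pyGetD_natCast, hga, hsa]
        simp only [PySem.List.pySetD, PySem.List.pySet?, PySem.List.pyGetD, PySem.List.pyGet?,
          PySem.List.pyIdx?]
        norm_num [show ((2:Int).toNat) = 2 from rfl, show ((3:Int).toNat) = 3 from rfl]
        rw [show glA.length + 1 = (glA ++ [g - 1]).length by simp]
        rw [show glA ++ (g - 1) :: glB' = (glA ++ [g - 1]) ++ glB' by simp]
        rw [ih _ _ _ _ _ _ _ _ hpre']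
        simp [hcross, List.take_succ_cons]
        constructor
        · ring
        · omega
    · -- pz ≤ 0: the loop walks to the end changing nothing
      have htail : ∀ (l : List Int) (pos : Nat) (res : List Int) (tc : Int) (gl : List Int),
          aLoop l pos pz res tc gl = (tc, pz, gl, res) := by
        intro l
        induction l with
        | nil => intro pos res tc gl; rfl
        | cons x xs ihl => intro pos res tc gl; simp [aLoop, hpz, ihl]
      rw [htail]
      simp [cross_of_nonpos pz (m :: rest) hpz]

-- prefix list characterisation ------------------------------------------------
def scanFrom (c : Int) : List Int → List Int
  | [] => []
  | m :: rest => (c + m) :: scanFrom (c + m) rest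

theorem bPrefix_foldl (ml : List Int) : ∀ (p : List Int) (c : Int),
    PySem.List.pyGetD p (-1) 0 = c → p ≠ [] →
    ml.foldl (fun p m => p ++ [PySem.List.pyGetD p (-1) 0 + m]) p = p ++ scanFrom c ml := by
  induction ml with
  | nil => intro p c _ _; simp [scanFrom]
  | cons m rest ih =>
    intro p c hc hp
    simp only [List.foldl_cons, hc, scanFrom]
    rw [ih (p ++ [c + m]) (c + m) (PySem.List.pyGetD_neg_one_append_singleton p (c + m) 0) (by simp)]
    simp

theorem bPrefix_eq (ml : List Int) : bPrefix ml = 0 :: scanFrom 0 ml := by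
  unfold bPrefix
  rw [bPrefix_foldl ml [0] 0 (by rfl) (by simp)]
  rfl

theorem scanFrom_getD (ml : List Int) : ∀ (c : Int) (i : Nat), i < ml.length →
    (scanFrom c ml).getD i 0 = c + ((ml.take (i + 1)).sum) := by
  induction ml with
  | nil => intro c i hi; simp at hi
  | cons m rest ih =>
    intro c i hi
    cases i with
    | zero => simp [scanFrom, List.take_succ_cons]
    | succ j =>
      have := ih (c + m) j (by simpa using hi)
      simp only [scanFrom, List.getD, List.getElem?_cons_succ, List.take_succ_cons]
      simp only [List.getD] at this
      rw [this]; simp; ring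

theorem bPrefix_getD (ml : List Int) (i : Nat) (hi : i ≤ ml.length) :
    (bPrefix ml).getD i 0 = (ml.take i).sum := by
  rw [bPrefix_eq]
  cases i with
  | zero => simp
  | succ j =>
    have hj : j < ml.length := by omega
    simp only [List.getD, List.getElem?_cons_succ]
    have := scanFrom_getD ml 0 j hj
    simp only [List.getD] at this
    rw [this]; simp

-- first-crossing search ------------------------------------------------------
theorem find?_congr_mem {α : Type} (l : List α) (p q : α → Bool)
    (h : ∀ x ∈ l, p x = q x) : l.find? p = l.find? q := by
  induction l with
  | nil => rfl
  | cons x xs ih =>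
    simp only [List.find?]
    rw [h x (by simp)]
    cases q x
    · exact ih (fun y hy => h y (by simp [hy]))
    · rfl

theorem findNat_cross (ml : List Int) : ∀ pz : Int,
    (((List.range ml.length).find? (fun k => decide (pz - ((ml.take k).sum) ≤ 0))).getD ml.length)
      = cross pz ml := by
  induction ml with
  | nil => intro pz; simp [cross]
  | cons m rest ih =>
    intro pz
    rw [List.length_cons, List.range_succ_eq_map]
    by_cases hpz : pz > 0
    · have h0 : (fun k => decide (pz - (((m :: rest).take k).sum) ≤ 0)) 0 = false := by
        simp; omega
      simp only [List.find?, h0, List.find?_map]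
      have hcomp : ((fun k => decide (pz - (((m :: rest).take k).sum) ≤ 0)) ∘ Nat.succ)
          = (fun k => decide ((pz - m) - ((rest.take k).sum) ≤ 0)) := by
        funext k
        simp [Function.comp, List.take_succ_cons]
        omega
      rw [hcomp]
      have := ih (pz - m)
      cases hfind : (List.range rest.length).find?
          (fun k => decide ((pz - m) - ((rest.take k).sum) ≤ 0)) with
      | none => rw [hfind] at this; simp [cross, hpz, ← this]
      | some k => rw [hfind] at this; simp [cross, hpz, ← this]
    · have h0 : (fun k => decide (pz - (((m :: rest).take k).sum) ≤ 0)) 0 = true := by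
        simp; omega
      simp only [List.find?, h0]
      simp [cross_of_nonpos pz (m :: rest) hpz]

-- B's k equals cross
theorem alt_k_eq (pz : Int) (ml : List Int) :
    (((PySem.List.pyRange 0 (ml.length : Int) 1).find?
        (fun i => decide (pz - PySem.List.pyGetD (bPrefix ml) i 0 ≤ 0))).getD (ml.length : Int))
      = (cross pz ml : Int) := by
  rw [PySem.List.pyRange_one]
  have hn : ((ml.length : Int) - 0).toNat = ml.length := by omega
  rw [hn, List.find?_map]
  have hcomp : (((fun i => decide (pz - PySem.List.pyGetD (bPrefix ml) i 0 ≤ 0)) ∘ fun k : Nat => (0 : Int) + ↑k))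
      = fun k : Nat => decide (pz - PySem.List.pyGetD (bPrefix ml) (k : Int) 0 ≤ 0) := by
    funext k; simp [Function.comp]
  rw [hcomp]
  rw [find?_congr_mem (List.range ml.length) _ (fun k => decide (pz - ((ml.take k).sum) ≤ 0))
    (by
      intro k hk
      have hk' : k ≤ ml.length := Nat.le_of_lt (List.mem_range.mp hk)
      rw [PySem.List.pyGetD_natCast, bPrefix_getD ml k hk'])]
  have := findNat_cross ml pz
  cases hfind : (List.range ml.length).find? (fun k => decide (pz - ((ml.take k).sum) ≤ 0)) with
  | none => rw [hfind] at this; simp [← this]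
  | some k => rw [hfind] at this; simp [← this]

-- ===== VERDICT (by name: the statement is the Claim_ definition above) =====
theorem calculateLessItem_spec : Claim_equal_calculateLessItem := by
  intro pz gl ml _hdom hpre
  unfold Spec_calculateLessItem calculateLessItem
  simp only [calculateLessItem_alt]
  unfold Pre_calculateLessItem at hpre
  have hA := aLoop_closed ml pz 0 0 0 0 0 [] gl hpre
  simp only [List.length_nil, List.nil_append, zero_add] at hA
  rw [hA]
  rw [alt_k_eq pz ml]
  have hk : cross pz ml ≤ ml.length := cross_le pz ml
  rw [PySem.List.pyGetD_natCast, bPrefix_getD ml (cross pz ml) hk]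
  rw [PySem.List.slice_to_natCast, PySem.List.slice_to_natCast, PySem.List.slice_from_natCast]
  simp [PySem.List.count_eq]
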